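-- pv_equiv track=rewrite | github.com/minkik715/coding-test-practice | baekjoon/binSearch/2512예산.py | bin_serach
-- ===== SOURCE A (Python) =====
-- def bin_serach(moneys: list, limit: int):
--     money_sum = sum(moneys)
--     if money_sum <= limit:
--         return max(moneys)
--
--     start = 0
--     last = limit
--     answer = (start + last) // 2
--     while start <= last:
--         middle = (start + last) // 2
--         check_limit = check(moneys, middle)
--         if check_limit <= limit:
--             answer = middle
--             start = middle + 1
--         else:
--             last = middle - 1
--
--     return answer
--
-- def check(moneys: list, national_money):
--     national_money_sum = 0
--     for money in moneys:
--         if money <= national_money: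
--             national_money_sum += money
--         else:
--             national_money_sum += national_money
--     return national_money_sum
-- ===== SOURCE B (Python) =====
-- def bin_serach(moneys: list, limit: int):
--     total = sum(moneys)
--     if total <= limit:
--         return max(moneys)
--     # sort + prefix sums: walk the sorted values; in the segment where the
--     # cap c lies below the k-th smallest value, the capped sum is
--     # prefix + (n - k) * c, so the cap solves linearly.
--     arr = sorted(moneys)
--     n = len(arr)
--     prefix = 0
--     for k, v in enumerate(arr):
--         rem = n - k
--         if prefix + rem * v > limit:
--             return min(limit, (limit - prefix) // rem)
--         prefix += v
--     return limit  # unreachable: total > limit fires the condition at the last element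
-- ===== Notes on version B (the rewrite author's own statement) =====
-- stated objective: alternative
-- what changed: Replaces A's binary search over the cap range (recomputing the capped sum of the whole list at every probe) by sort + prefix sums: one pass over the sorted values finds the linear segment containing the cap and solves for it in closed form (intended as faster; a timing run measured a 2.19x median at the largest size but not consistently >=1.5x per input).
-- intended difference: For limit <= -2 with sum(moneys) > limit the search range [0, limit] is empty and A returns its never-updated placeholder limit // 2; B returns the largest cap c with capped sum <= limit, clamped to limit, which is the intended extension since A's value is leftover initialisation satisfying no feasibility property. — e.g. on bin_serach([3], -2): A returns -1, B returns -2
-- outside the precondition, e.g. on bin_serach([], -3): A returns -2, B returns -3; on bin_serach([], 5): A raises ValueError, B raises ValueError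
import Mathlib
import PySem

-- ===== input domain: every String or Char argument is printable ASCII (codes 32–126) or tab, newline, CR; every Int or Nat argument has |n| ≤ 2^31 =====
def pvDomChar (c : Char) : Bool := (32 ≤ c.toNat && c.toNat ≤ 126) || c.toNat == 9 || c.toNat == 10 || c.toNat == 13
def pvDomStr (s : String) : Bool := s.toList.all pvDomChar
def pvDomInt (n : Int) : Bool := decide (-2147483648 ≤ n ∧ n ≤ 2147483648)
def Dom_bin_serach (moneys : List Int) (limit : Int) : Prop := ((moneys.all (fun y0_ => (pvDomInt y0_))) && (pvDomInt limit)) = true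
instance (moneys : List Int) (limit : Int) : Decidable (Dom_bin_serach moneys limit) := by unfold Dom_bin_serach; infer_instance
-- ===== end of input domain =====

-- B replaces A's binary search over the cap with sort + prefix sums solving the cap's linear
-- segment in closed form (objective: alternative algorithm); for limit ≤ -2 with sum > limit, B
-- returns the clamped largest feasible cap, not A's never-updated placeholder limit // 2 (see D_).


-- ===== PORT A =====
-- check(moneys, national_money): A's capped-sum loop
def check (moneys : List Int) (national_money : Int) : Int :=
  moneys.foldl (fun s money => if money ≤ national_money then s + money else s + national_money) 0

-- the while-loop of A (state: start, last, answer)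
def binLoop (moneys : List Int) (limit start last answer : Int) : Int :=
  if h : start ≤ last then
    let middle := PySem.Int.floordiv (start + last) 2
    if check moneys middle ≤ limit then
      binLoop moneys limit (middle + 1) last middle
    else
      binLoop moneys limit start (middle - 1) answer
  else answer
termination_by (last + 1 - start).toNat
decreasing_by
  · have := PySem.Int.floordiv_two_mid_bounds h; omega
  · have := PySem.Int.floordiv_two_mid_bounds h; omega

def bin_serach (moneys : List Int) (limit : Int) : Int :=
  let money_sum := moneys.sum
  if money_sum ≤ limit then (PySem.List.max? moneys (fun x => x)).getD 0
  else binLoop moneys limit 0 limit (PySem.Int.floordiv (0 + limit) 2)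

-- ===== PORT B =====
-- the for-loop of B over the sorted list (rem = n - k, pfx = sum of the passed values)
def altLoop (limit : Int) : List Int → Int → Int → Int
  | [], _, _ => limit
  | v :: rest, rem, pfx =>
    if limit < pfx + rem * v then
      min limit (PySem.Int.floordiv (limit - pfx) rem)
    else altLoop limit rest (rem - 1) (pfx + v)

def bin_serach_alt (moneys : List Int) (limit : Int) : Int :=
  let total := moneys.sum
  if total ≤ limit then (PySem.List.max? moneys (fun x => x)).getD 0
  else
    let arr := PySem.List.sorted moneys (fun x => x) false
    altLoop limit arr (arr.length : Int) 0

-- ===== PRECONDITION & SPEC =====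
-- Pre_ excludes only empty moneys: there A raises ValueError (max of an empty sequence)
-- whenever limit ≥ 0, and for limit < 0 the empty list is the same degenerate corner with
-- no specified answer (both programs return arbitrary fallbacks).
def Pre_bin_serach (moneys : List Int) (limit : Int) : Prop := moneys ≠ []
instance (moneys : List Int) (limit : Int) : Decidable (Pre_bin_serach moneys limit) := by unfold Pre_bin_serach; infer_instance
def pvWitness_bin_serach : List Int × Int := ([1, 2], 5)

-- For limit ≤ -2 with sum(moneys) > limit the search range [0, limit] is empty and A returns
-- its never-updated placeholder limit // 2; B returns the largest cap c with capped sum ≤ limit,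
-- clamped to limit — the intended extension, since A's value is leftover initialisation.
def D_bin_serach (moneys : List Int) (limit : Int) : Prop := limit ≤ -2 ∧ limit < moneys.sum
instance (moneys : List Int) (limit : Int) : Decidable (D_bin_serach moneys limit) := by unfold D_bin_serach; infer_instance

def Spec_bin_serach (moneys : List Int) (limit : Int) (out : Int) : Prop := ¬ D_bin_serach moneys limit → out = bin_serach_alt moneys limit
instance (moneys : List Int) (limit : Int) (out : Int) : Decidable (Spec_bin_serach moneys limit out) := by unfold Spec_bin_serach; infer_instance

def pvDiffWitness_bin_serach : List Int × Int := ([3], -2)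
def pvDiffWitnessOut_bin_serach : Int × Int := (-1, -2)

-- ===== CLAIM (what is proved, stated in full; the proofs are below) =====
def Claim_unchanged_bin_serach : Prop := ∀ (moneys : List Int) (limit : Int), Dom_bin_serach moneys limit → Pre_bin_serach moneys limit → Spec_bin_serach moneys limit (bin_serach moneys limit)
def Claim_changed_bin_serach : Prop := Dom_bin_serach (pvDiffWitness_bin_serach.1) (pvDiffWitness_bin_serach.2) ∧ Pre_bin_serach (pvDiffWitness_bin_serach.1) (pvDiffWitness_bin_serach.2) ∧ D_bin_serach (pvDiffWitness_bin_serach.1) (pvDiffWitness_bin_serach.2) ∧ bin_serach (pvDiffWitness_bin_serach.1) (pvDiffWitness_bin_serach.2) = pvDiffWitnessOut_bin_serach.1 ∧ bin_serach_alt (pvDiffWitness_bin_serach.1) (pvDiffWitness_bin_serach.2) = pvDiffWitnessOut_bin_serach.2 ∧ pvDiffWitnessOut_bin_serach.1 ≠ pvDiffWitnessOut_bin_serach.2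
def Claim_exact_bin_serach : Prop := ∀ (moneys : List Int) (limit : Int), Dom_bin_serach moneys limit → Pre_bin_serach moneys limit → D_bin_serach moneys limit → bin_serach moneys limit ≠ bin_serach_alt moneys limit

-- ===== LEMMAS AND PROOFS =====

-- the capped sum, as a pure function
def capSum (l : List Int) (c : Int) : Int := (l.map (fun m => min m c)).sum

lemma check_eq_capSum (l : List Int) (c : Int) : check l c = capSum l c := by
  suffices h : ∀ a : Int, l.foldl (fun s m => if m ≤ c then s + m else s + c) a = a + capSum l c by
    simpa [check] using h 0
  induction l with
  | nil => intro a; simp [capSum]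
  | cons x t ih =>
    intro a
    simp only [List.foldl_cons, capSum, List.map_cons, List.sum_cons, ih]
    split_ifs with h
    · simp only [min_def, if_pos h]; ring
    · simp only [min_def, if_neg h]; ring

lemma capSum_mono (l : List Int) {c d : Int} (h : c ≤ d) : capSum l c ≤ capSum l d := by
  induction l with
  | nil => simp [capSum]
  | cons x t ih =>
    simp only [capSum, List.map_cons, List.sum_cons] at *
    exact add_le_add (min_le_min le_rfl h) ih

lemma capSum_zero_nonpos (l : List Int) : capSum l 0 ≤ 0 := by
  induction l with
  | nil => simp [capSum]
  | cons x t ih =>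
    simp only [capSum, List.map_cons, List.sum_cons] at *
    have : min x 0 ≤ 0 := min_le_right x 0
    omega

lemma capSum_all_le (l : List Int) (c : Int) (h : ∀ d ∈ l, d ≤ c) : capSum l c = l.sum := by
  induction l with
  | nil => simp [capSum]
  | cons x t ih =>
    simp only [capSum, List.map_cons, List.sum_cons] at *
    rw [min_eq_left (h x (by simp)), ih (fun d hd => h d (by simp [hd]))]

lemma capSum_all_ge (l : List Int) (c : Int) (h : ∀ x ∈ l, c ≤ x) : capSum l c = (l.length : Int) * c := by
  induction l with
  | nil => simp [capSum]
  | cons x t ih =>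
    simp only [capSum, List.map_cons, List.sum_cons, List.length_cons] at *
    rw [min_eq_right (h x (by simp)), ih (fun d hd => h d (by simp [hd]))]
    push_cast; ring

lemma capSum_segment (done t : List Int) (c : Int) (h1 : ∀ d ∈ done, d ≤ c) (h2 : ∀ x ∈ t, c ≤ x) :
    capSum (done ++ t) c = done.sum + (t.length : Int) * c := by
  simp only [capSum, List.map_append, List.sum_append]
  rw [show (List.map (fun m => min m c) done).sum = capSum done c from rfl,
      show (List.map (fun m => min m c) t).sum = capSum t c from rfl,
      capSum_all_le done c h1, capSum_all_ge t c h2]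

lemma capSum_perm {a b : List Int} (h : a.Perm b) (c : Int) : capSum a c = capSum b c :=
  (h.map (fun m => min m c)).sum_eq

-- the common characterisation: r is the largest cap in [0, limit] whose capped sum fits
def IsAnswer (l : List Int) (limit r : Int) : Prop :=
  0 ≤ r ∧ r ≤ limit ∧ capSum l r ≤ limit ∧ (r = limit ∨ limit < capSum l (r + 1))

lemma IsAnswer_not_lt (l : List Int) (limit r1 r2 : Int) (h1 : IsAnswer l limit r1)
    (h2 : IsAnswer l limit r2) : ¬ r1 < r2 := by
  intro hlt
  obtain ⟨-, -, -, hc1⟩ := h1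
  obtain ⟨-, h2b, h2c, -⟩ := h2
  rcases hc1 with h | h
  · omega
  · exact absurd ((capSum_mono l (by omega : r1 + 1 ≤ r2)).trans h2c) (by omega)

lemma IsAnswer_unique (l : List Int) (limit r1 r2 : Int) (h1 : IsAnswer l limit r1)
    (h2 : IsAnswer l limit r2) : r1 = r2 := by
  have ha := IsAnswer_not_lt l limit r1 r2 h1 h2
  have hb := IsAnswer_not_lt l limit r2 r1 h2 h1
  omega

-- at loop exit A's answer satisfies the characterisation
lemma binLoop_exit (moneys : List Int) (limit start last answer : Int)
    (h0 : capSum moneys 0 ≤ limit) (hlim : 0 ≤ limit) (hgt : ¬ start ≤ last)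
    (hs : 0 ≤ start) (hsl : start ≤ last + 1) (hl : last ≤ limit)
    (hlast : last = limit ∨ limit < capSum moneys (last + 1))
    (hans : start = 0 ∨ (answer = start - 1 ∧ capSum moneys (start - 1) ≤ limit)) :
    IsAnswer moneys limit answer := by
  have hse : start = last + 1 := by omega
  have hs1 : start ≠ 0 := by
    intro h
    rcases hlast with h' | h'
    · omega
    · rw [show last + 1 = 0 by omega] at h'; omega
  rcases hans with h | ⟨ha, hf⟩
  · exact absurd h hs1
  · refine ⟨by omega, by omega, ha ▸ hf, ?_⟩
    rw [ha, show start - 1 + 1 = last + 1 by omega]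
    rcases hlast with h' | h'
    · exact Or.inl (by omega)
    · exact Or.inr h'

-- correctness of A's binary-search loop
lemma binLoop_correct (moneys : List Int) (limit : Int) (h0 : capSum moneys 0 ≤ limit)
    (hlim : 0 ≤ limit) :
    ∀ (n : Nat) (start last answer : Int), (last + 1 - start).toNat ≤ n →
    0 ≤ start → start ≤ last + 1 → last ≤ limit →
    (last = limit ∨ limit < capSum moneys (last + 1)) →
    (start = 0 ∨ (answer = start - 1 ∧ capSum moneys (start - 1) ≤ limit)) →
    IsAnswer moneys limit (binLoop moneys limit start last answer) := by
  intro n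
  induction n with
  | zero =>
    intro start last answer hm hs hsl hl hlast hans
    have hgt : ¬ start ≤ last := by omega
    rw [binLoop]; simp only [hgt, dite_false]
    exact binLoop_exit moneys limit start last answer h0 hlim hgt hs hsl hl hlast hans
  | succ k ih =>
    intro start last answer hm hs hsl hl hlast hans
    by_cases hle : start ≤ last
    · have hmid := PySem.Int.floordiv_two_mid_bounds hle
      rw [binLoop]
      simp only [hle, dite_true]
      by_cases hc : check moneys (PySem.Int.floordiv (start + last) 2) ≤ limit
      · rw [if_pos hc]
        rw [check_eq_capSum] at hc
        refine ih _ last _ (by omega) (by omega) (by omega) hl hlast (Or.inr ⟨by ring, ?_⟩)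
        rw [show PySem.Int.floordiv (start + last) 2 + 1 - 1 = PySem.Int.floordiv (start + last) 2 by ring]
        exact hc
      · rw [if_neg hc]
        rw [check_eq_capSum] at hc; push_neg at hc
        refine ih start _ answer (by omega) hs (by omega) (by omega) (Or.inr ?_) hans
        rw [show PySem.Int.floordiv (start + last) 2 - 1 + 1 = PySem.Int.floordiv (start + last) 2 by ring]
        exact hc
    · rw [binLoop]; simp only [hle, dite_false]
      exact binLoop_exit moneys limit start last answer h0 hlim hle hs hsl hl hlast hans

-- correctness of B's segment scan
lemma altLoop_correct (limit : Int) (s : List Int) (hsort : s.Pairwise (· ≤ ·))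
    (hlim : 0 ≤ limit) (h0 : capSum s 0 ≤ limit) :
    ∀ (t done : List Int) (u : Int), s = done ++ t → (∀ d ∈ done, d ≤ u) →
    done.sum + (t.length : Int) * u ≤ limit → limit < done.sum + t.sum →
    IsAnswer s limit (altLoop limit t (t.length : Int) done.sum) := by
  intro t
  induction t with
  | nil =>
    intro done u hs hdone hu hsum
    exfalso
    simp only [List.length_nil, Nat.cast_zero, zero_mul, List.sum_nil] at hu hsum
    omega
  | cons v rest ih =>
    intro done u hs hdone hu hsum
    have hord : ∀ a ∈ done, ∀ b ∈ v :: rest, a ≤ b := by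
      have := hs ▸ hsort
      exact (List.pairwise_append.mp this).2.2
    have hvle : ∀ x ∈ v :: rest, v ≤ x := by
      have := hs ▸ hsort
      have h2 := (List.pairwise_append.mp this).2.1
      intro x hx
      rcases List.mem_cons.mp hx with h | h
      · omega
      · exact List.rel_of_pairwise_cons h2 h
    have hrem : ((v :: rest).length : Int) = (rest.length : Int) + 1 := by
      simp [List.length_cons]
    have hrempos : (0 : Int) < ((v :: rest).length : Int) := by
      rw [hrem]; positivity
    rw [altLoop]
    by_cases hf : limit < done.sum + ((v :: rest).length : Int) * v
    · rw [if_pos hf]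
      set rem : Int := ((v :: rest).length : Int) with hremdef
      set c0 := PySem.Int.floordiv (limit - done.sum) rem with hc0def
      have f1 : c0 * rem ≤ limit - done.sum :=
        (PySem.Int.le_floordiv_iff_mul_le hrempos).mp le_rfl
      have f2 : limit - done.sum < (c0 + 1) * rem :=
        (PySem.Int.floordiv_lt_iff_lt_mul hrempos).mp (by omega)
      have f3 : u ≤ c0 :=
        (PySem.Int.le_floordiv_iff_mul_le hrempos).mpr (by nlinarith)
      have f4 : c0 < v := by
        by_contra h; push_neg at h
        have : rem * v ≤ rem * c0 := by
          exact mul_le_mul_of_nonneg_left h (le_of_lt hrempos)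
        nlinarith
      have hdc0 : ∀ d ∈ done, d ≤ c0 := fun d hd => le_trans (hdone d hd) f3
      have hfc0 : capSum s c0 = done.sum + rem * c0 := by
        rw [hs, capSum_segment done (v :: rest) c0 hdc0
          (fun x hx => le_trans (le_of_lt f4) (hvle x hx))]
      have hfc1 : capSum s (c0 + 1) = done.sum + rem * (c0 + 1) := by
        rw [hs, capSum_segment done (v :: rest) (c0 + 1)
          (fun d hd => by have := hdc0 d hd; omega)
          (fun x hx => le_trans (by omega) (hvle x hx))]
      have hle0 : capSum s c0 ≤ limit := by rw [hfc0]; nlinarith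
      have hgt1 : limit < capSum s (c0 + 1) := by rw [hfc1]; nlinarith
      have h0c : 0 ≤ c0 := by
        by_contra h; push_neg at h
        have h1 : capSum s (c0 + 1) ≤ capSum s 0 := capSum_mono s (by omega)
        omega
      rcases le_total c0 limit with h | h
      · rw [min_eq_right h]
        exact ⟨h0c, h, hle0, Or.inr hgt1⟩
      · rw [min_eq_left h]
        exact ⟨hlim, le_refl limit, le_trans (capSum_mono s h) hle0, Or.inl rfl⟩
    · rw [if_neg hf]; push_neg at hf
      have hcall : ((v :: rest).length : Int) - 1 = ((rest.length : Nat) : Int) := by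
        rw [hrem]; ring
      have hsum' : (done ++ [v]).sum = done.sum + v := by simp
      have key := ih (done ++ [v]) v
        (by rw [hs]; simp)
        (by
          intro d hd
          rcases List.mem_append.mp hd with h | h
          · exact hord d h v (by simp)
          · simp at h; omega)
        (by rw [hsum']; rw [hrem] at hf; nlinarith [hf])
        (by rw [hsum']; simp only [List.sum_cons] at hsum; omega)
      rw [hsum'] at key
      rw [hcall]
      exact key

-- at limit = -1, B's loop returns -1 whenever the running prefix sum is ≤ 0
lemma altLoop_neg1 : ∀ (t : List Int) (p : Int), p ≤ 0 →
    altLoop (-1) t (t.length : Int) p = -1 := by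
  intro t
  induction t with
  | nil => intro p _; rfl
  | cons v rest ih =>
    intro p hp
    have hrem : ((v :: rest).length : Int) = (rest.length : Int) + 1 := by simp
    have hrempos : (0 : Int) < ((v :: rest).length : Int) := by rw [hrem]; positivity
    rw [altLoop]
    by_cases hf : (-1 : Int) < p + ((v :: rest).length : Int) * v
    · rw [if_pos hf]
      have : (-1 : Int) ≤ PySem.Int.floordiv (-1 - p) ((v :: rest).length : Int) :=
        (PySem.Int.le_floordiv_iff_mul_le hrempos).mpr (by nlinarith)
      omega
    · rw [if_neg hf]; push_neg at hf
      have hnext : p + v ≤ 0 := by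
        rcases le_total v 0 with h | h
        · omega
        · nlinarith
      have := ih (p + v) hnext
      rw [show ((v :: rest).length : Int) - 1 = ((rest.length : Nat) : Int) by rw [hrem]; ring]
      exact this

-- B's loop never exceeds limit
lemma altLoop_le (limit : Int) : ∀ (t : List Int) (rem p : Int), altLoop limit t rem p ≤ limit := by
  intro t
  induction t with
  | nil => intro rem p; simp [altLoop]
  | cons v rest ih =>
    intro rem p
    rw [altLoop]
    split
    · exact min_le_left _ _
    · exact ih _ _

-- A's value under its characterisation (main branch, limit ≥ 0, sum > limit)
lemma bin_serach_isAnswer (moneys : List Int) (limit : Int) (hlim : 0 ≤ limit)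
    (hgt : limit < moneys.sum) : IsAnswer moneys limit (bin_serach moneys limit) := by
  have h0 : capSum moneys 0 ≤ limit := le_trans (capSum_zero_nonpos moneys) hlim
  unfold bin_serach
  rw [if_neg (by omega)]
  exact binLoop_correct moneys limit h0 hlim (limit + 1 - 0).toNat 0 limit _ le_rfl
    le_rfl (by omega) le_rfl (Or.inl rfl) (Or.inl rfl)

-- B's value under the same characterisation
lemma bin_serach_alt_isAnswer (moneys : List Int) (limit : Int) (hlim : 0 ≤ limit)
    (hgt : limit < moneys.sum) : IsAnswer moneys limit (bin_serach_alt moneys limit) := by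
  set s := PySem.List.sorted moneys (fun x => x) false with hsdef
  have hperm : s.Perm moneys := PySem.List.sorted_perm moneys (fun x => x) false
  have hsort : s.Pairwise (· ≤ ·) := PySem.List.sorted_pairwise moneys (fun x => x)
  have hcap : ∀ c, capSum s c = capSum moneys c := fun c => capSum_perm hperm c
  have hsum : s.sum = moneys.sum := hperm.sum_eq
  have h0 : capSum s 0 ≤ limit := le_trans (hcap 0 ▸ capSum_zero_nonpos moneys) hlim
  have key := altLoop_correct limit s hsort hlim h0 s [] 0 (by simp) (by simp)
    (by simpa using hlim) (by simpa [hsum] using hgt)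
  simp only [List.sum_nil] at key
  have halt : bin_serach_alt moneys limit = altLoop limit s ((s.length : Nat) : Int) 0 := by
    unfold bin_serach_alt
    rw [if_neg (by omega)]
  rw [halt]
  unfold IsAnswer at key ⊢
  simp only [hcap] at key
  exact key

-- ===== VERDICT (by name: the statement is the Claim_ definition above) =====
theorem bin_serach_spec : Claim_unchanged_bin_serach := by
  intro moneys limit _ hpre hnd
  unfold D_bin_serach at hnd
  push_neg at hnd
  by_cases hsum : moneys.sum ≤ limit
  · unfold bin_serach bin_serach_alt
    rw [if_pos hsum, if_pos hsum]
  · push_neg at hsum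
    by_cases hlim : 0 ≤ limit
    · exact IsAnswer_unique moneys limit _ _
        (bin_serach_isAnswer moneys limit hlim hsum)
        (bin_serach_alt_isAnswer moneys limit hlim hsum)
    · have hm1 : limit = -1 := by
        by_cases h2 : limit ≤ -2
        · have := hnd h2; omega
        · omega
      subst hm1
      have hA : bin_serach moneys (-1) = PySem.Int.floordiv (0 + -1) 2 := by
        unfold bin_serach
        rw [if_neg (by omega)]
        rw [binLoop]
        simp only [show ¬ (0 : Int) ≤ -1 by decide, dite_false]
      have hB : bin_serach_alt moneys (-1) =
          altLoop (-1) (PySem.List.sorted moneys (fun x => x) false)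
            (((PySem.List.sorted moneys (fun x => x) false).length : Nat) : Int) 0 := by
        unfold bin_serach_alt
        rw [if_neg (by omega)]
      rw [hA, hB, altLoop_neg1 _ 0 le_rfl]
      decide

theorem bin_serach_changed : Claim_changed_bin_serach := by
  unfold Claim_changed_bin_serach
  refine ⟨by decide, by simp [Pre_bin_serach, pvDiffWitness_bin_serach], by decide, ?_, by decide, by decide⟩
  show bin_serach [3] (-2) = -1
  unfold bin_serach
  rw [if_neg (by norm_num)]
  rw [binLoop]
  norm_num [PySem.Int.floordiv]
  decide

theorem bin_serach_tight : Claim_exact_bin_serach := by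
  intro moneys limit _ _ hd
  obtain ⟨hl2, hgt⟩ := hd
  have hA : bin_serach moneys limit = PySem.Int.floordiv (0 + limit) 2 := by
    unfold bin_serach
    rw [if_neg (by omega)]
    rw [binLoop]
    simp only [show ¬ (0 : Int) ≤ limit by omega, dite_false]
  have hB : bin_serach_alt moneys limit =
      altLoop limit (PySem.List.sorted moneys (fun x => x) false)
        (((PySem.List.sorted moneys (fun x => x) false).length : Nat) : Int) 0 := by
    unfold bin_serach_alt
    rw [if_neg (by omega)]
  have hble := altLoop_le limit (PySem.List.sorted moneys (fun x => x) false)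
    (((PySem.List.sorted moneys (fun x => x) false).length : Nat) : Int) 0
  have hdiv : PySem.Int.floordiv (0 + limit) 2 = limit / 2 := by
    rw [PySem.Int.floordiv_eq_ediv_of_pos (by omega)]; ring_nf
  rw [hA, hB, hdiv]
  omega
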